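-- pv_equiv track=rewrite | github.com/jposhie1777/nba-prop-analyzer | propfinder/ingest.py | rank_roster_players
-- ===== SOURCE A (Python) =====
-- def si(value):
--     """Safe int."""
--     try:
--         return int(value) if value is not None else None
--     except (ValueError, TypeError):
--         return None
--
-- def unique_ints(values):
--     out = []
--     seen = set()
--     for value in values:
--         parsed = si(value)
--         if parsed is None or parsed in seen:
--             continue
--         seen.add(parsed)
--         out.append(parsed)
--     return out
--
-- def rank_roster_players(team_id, roster_players, ranked_history):
--     roster_ordered = unique_ints(roster_players)
--     if not roster_ordered:
--         return []
--
--     history_rank  = {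
--         batter_id: idx
--         for idx, batter_id in enumerate(ranked_history.get(team_id, []))
--     }
--     roster_index = {batter_id: idx for idx, batter_id in enumerate(roster_ordered)}
--     return sorted(
--         roster_ordered,
--         key=lambda batter_id: (
--             history_rank.get(batter_id, 10**9),
--             roster_index[batter_id],
--         ),
--     )
-- ===== SOURCE B (Python) =====
-- def si(value):
--     """Safe int."""
--     try:
--         return int(value) if value is not None else None
--     except (ValueError, TypeError):
--         return None
--
-- def rank_roster_players(team_id, roster_players, ranked_history):
--     rank = {pid: idx for idx, pid in enumerate(ranked_history.get(team_id, []))}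
--     out = []           # pairs (history rank or sentinel, player id), kept sorted by rank
--     seen = set()
--     for value in roster_players:
--         pid = si(value)
--         if pid is None or pid in seen:
--             continue
--         seen.add(pid)
--         r = rank.get(pid, 10**9)
--         i = len(out)
--         while i > 0 and out[i - 1][0] > r:
--             i -= 1
--         out.insert(i, (r, pid))
--     return [pid for _, pid in out]
-- ===== Notes on version B (the rewrite author's own statement) =====
-- stated objective: alternative
-- what changed: B replaces A's composite-key library sort plus roster_index dict with a fused single pass that dedupes the roster and stably inserts each id into an output list kept sorted by its history rank, relying on insertion stability instead of the roster-position tiebreak key.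
import Mathlib
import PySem

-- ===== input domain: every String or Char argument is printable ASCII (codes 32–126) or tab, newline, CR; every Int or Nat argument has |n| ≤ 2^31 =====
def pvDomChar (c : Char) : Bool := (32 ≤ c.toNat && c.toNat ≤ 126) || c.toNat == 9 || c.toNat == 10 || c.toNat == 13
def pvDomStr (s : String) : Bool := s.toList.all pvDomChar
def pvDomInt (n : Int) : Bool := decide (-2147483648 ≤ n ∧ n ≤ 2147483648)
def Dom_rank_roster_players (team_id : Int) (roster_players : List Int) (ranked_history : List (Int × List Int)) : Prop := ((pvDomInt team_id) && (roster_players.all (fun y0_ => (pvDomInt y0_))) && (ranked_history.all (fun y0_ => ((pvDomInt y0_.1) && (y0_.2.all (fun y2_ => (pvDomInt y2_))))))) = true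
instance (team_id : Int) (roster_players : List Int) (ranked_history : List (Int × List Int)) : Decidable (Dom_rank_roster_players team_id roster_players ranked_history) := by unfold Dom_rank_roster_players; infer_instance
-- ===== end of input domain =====

-- B replaces A's composite-key library sort (with its roster_index dict) by a fused single pass
-- that dedupes and stably inserts each id into a list kept sorted by history rank (alternative decomposition).

-- ===== PORT A =====
-- si(value) on an int argument: int(value) is the identity and never raises
def si_a (value : Int) : Option Int := some value

def unique_ints (values : List Int) : List Int :=
  (values.foldl
    (fun (st : List Int × PySem.Set Int) value =>
      match si_a value with
      | none => st
      | some parsed =>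
        if st.2.contains parsed then st
        else (st.1 ++ [parsed], PySem.Set.add st.2 parsed))
    ([], PySem.Set.empty)).1

-- {batter_id: idx for idx, batter_id in enumerate(l)} (shared shape of A's two dict comprehensions and B's one)
def pyEnumDict (l : List Int) : PySem.Dict Int Int :=
  (PySem.List.enumerate l 0).foldl (fun d p => d.insert p.2 p.1) PySem.Dict.empty

def rank_roster_players (team_id : Int) (roster_players : List Int) (ranked_history : List (Int × List Int)) : List Int :=
  let roster_ordered := unique_ints roster_players
  if roster_ordered = [] then []
  else
    let history_rank := pyEnumDict ((PySem.Dict.mk ranked_history).getD team_id [])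
    let roster_index := pyEnumDict roster_ordered
    -- roster_index[batter_id]: the key is always present, so Python's [] never raises; .getD ... 0 is exact here
    PySem.List.sorted2 roster_ordered
      (fun batter_id => history_rank.getD batter_id (10^9))
      (fun batter_id => roster_index.getD batter_id 0)

-- ===== PORT B =====
-- Source B's own si, on an int argument
def si_b (value : Int) : Option Int := some value

-- Source B's backwards scan 'i = len(out); while i > 0 and out[i-1][0] > r: i -= 1' followed by
-- 'out.insert(i, (r, pid))': the same scan written over the reversed list (exact, step for step)
def insRev (p : Int × Int) : List (Int × Int) → List (Int × Int)
  | [] => [p]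
  | y :: ys => if y.1 > p.1 then y :: insRev p ys else p :: y :: ys

def rank_roster_players_alt (team_id : Int) (roster_players : List Int) (ranked_history : List (Int × List Int)) : List Int :=
  let rank := pyEnumDict ((PySem.Dict.mk ranked_history).getD team_id [])
  let st := roster_players.foldl
    (fun (st : List (Int × Int) × PySem.Set Int) value =>
      match si_b value with
      | none => st
      | some pid =>
        if st.2.contains pid then st
        else ((insRev (rank.getD pid (10^9), pid) st.1.reverse).reverse, PySem.Set.add st.2 pid))
    ([], PySem.Set.empty)
  st.1.map (·.2)

-- ===== PRECONDITION & SPEC =====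
def Spec_rank_roster_players (team_id : Int) (roster_players : List Int) (ranked_history : List (Int × List Int)) (out : List Int) : Prop := out = rank_roster_players_alt team_id roster_players ranked_history
instance (team_id : Int) (roster_players : List Int) (ranked_history : List (Int × List Int)) (out : List Int) : Decidable (Spec_rank_roster_players team_id roster_players ranked_history out) := by unfold Spec_rank_roster_players; infer_instance

-- ===== CLAIM (what is proved, stated in full; the proofs are below) =====
def Claim_equal_rank_roster_players : Prop := ∀ (team_id : Int) (roster_players : List Int) (ranked_history : List (Int × List Int)), Dom_rank_roster_players team_id roster_players ranked_history → Spec_rank_roster_players team_id roster_players ranked_history (rank_roster_players team_id roster_players ranked_history)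

-- ===== LEMMAS AND PROOFS =====

-- the ids appended by the shared dedup loop, given the already-seen set
def newIds (seen : PySem.Set Int) : List Int → List Int
  | [] => []
  | v :: vs => if seen.contains v then newIds seen vs else v :: newIds (PySem.Set.add seen v) vs

lemma unique_ints_fold (values : List Int) (out : List Int) (seen : PySem.Set Int) :
    (values.foldl
      (fun (st : List Int × PySem.Set Int) value =>
        match si_a value with
        | none => st
        | some parsed =>
          if st.2.contains parsed then st
          else (st.1 ++ [parsed], PySem.Set.add st.2 parsed))
      (out, seen)).1 = out ++ newIds seen values := by
  set f := (fun (st : List Int × PySem.Set Int) value =>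
        match si_a value with
        | none => st
        | some parsed =>
          if st.2.contains parsed then st
          else (st.1 ++ [parsed], PySem.Set.add st.2 parsed)) with hf
  induction values generalizing out seen with
  | nil => simp [newIds]
  | cons v vs ih =>
    rw [List.foldl_cons]
    by_cases h : v ∈ seen
    · have e : f (out, seen) v = (out, seen) := by rw [hf]; simp [si_a, h]
      rw [e, ih]
      simp [newIds, h]
    · have e : f (out, seen) v = (out ++ [v], PySem.Set.add seen v) := by rw [hf]; simp [si_a, h]
      rw [e, ih]
      simp [newIds, h]

lemma alt_fold (rank : PySem.Dict Int Int) (values : List Int) (acc : List (Int × Int)) (seen : PySem.Set Int) :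
    (values.foldl
      (fun (st : List (Int × Int) × PySem.Set Int) value =>
        match si_b value with
        | none => st
        | some pid =>
          if st.2.contains pid then st
          else ((insRev (rank.getD pid (10^9), pid) st.1.reverse).reverse, PySem.Set.add st.2 pid))
      (acc, seen)).1
    = (newIds seen values).foldl (fun a pid => (insRev (rank.getD pid (10^9), pid) a.reverse).reverse) acc := by
  set f := (fun (st : List (Int × Int) × PySem.Set Int) value =>
      match si_b value with
      | none => st
      | some pid =>
        if st.2.contains pid then st
        else ((insRev (rank.getD pid (10^9), pid) st.1.reverse).reverse, PySem.Set.add st.2 pid)) with hf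
  induction values generalizing acc seen with
  | nil => simp [newIds]
  | cons v vs ih =>
    rw [List.foldl_cons]
    by_cases h : v ∈ seen
    · have e : f (acc, seen) v = (acc, seen) := by rw [hf]; simp [si_b, h]
      rw [e, ih]
      simp [newIds, h]
    · have e : f (acc, seen) v = ((insRev (rank.getD v (10^9), v) acc.reverse).reverse, PySem.Set.add seen v) := by
        rw [hf]; simp [si_b, h]
      rw [e, ih]
      simp [newIds, h]

lemma mem_newIds {b : Int} : ∀ (values : List Int) (seen : PySem.Set Int),
    b ∈ newIds seen values → b ∉ seen := by
  intro values
  induction values with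
  | nil => intro seen h; simp [newIds] at h
  | cons v vs ih =>
    intro seen h
    simp only [newIds] at h
    by_cases hc : v ∈ seen
    · simp [hc] at h; exact ih seen h
    · simp [hc] at h
      rcases h with rfl | h
      · exact hc
      · intro hb
        have hadd : PySem.Set.add seen v = seen ++ [v] := by simp [PySem.Set.add, PySem.Set.contains, hc]
        rw [← hadd] at h
        exact ih (PySem.Set.add seen v) h ((PySem.Set.mem_add seen v b).mpr (Or.inl hb))

lemma newIds_nodup : ∀ (values : List Int) (seen : PySem.Set Int), (newIds seen values).Nodup := by
  intro values
  induction values with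
  | nil => intro seen; simp [newIds]
  | cons v vs ih =>
    intro seen
    simp only [newIds]
    by_cases hc : v ∈ seen
    · simp [hc]; exact ih seen
    · simp [hc]
      refine ⟨fun h => ?_, ih _⟩
      have hadd : PySem.Set.add seen v = seen ++ [v] := by simp [PySem.Set.add, PySem.Set.contains, hc]
      rw [← hadd] at h
      exact mem_newIds vs (PySem.Set.add seen v) h ((PySem.Set.mem_add seen v v).mpr (Or.inr rfl))

-- proof-side view of the insertion: the same position found by a forward scan
def insLoop (p : Int × Int) : List (Int × Int) → List (Int × Int)
  | [] => [p]
  | y :: ys => if y.1 ≤ p.1 then y :: insLoop p ys else p :: y :: ys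

lemma insLoop_all_le (p : Int × Int) : ∀ (l : List (Int × Int)), (∀ z ∈ l, z.1 ≤ p.1) → insLoop p l = l ++ [p] := by
  intro l
  induction l with
  | nil => intro _; simp [insLoop]
  | cons y ys ih =>
    intro h
    have hy : y.1 ≤ p.1 := h y List.mem_cons_self
    simp only [insLoop, if_pos hy, List.cons_append]
    rw [ih (fun z hz => h z (List.mem_cons_of_mem _ hz))]

lemma insLoop_append_last (p y : Int × Int) (hy : p.1 < y.1) :
    ∀ (l : List (Int × Int)), insLoop p (l ++ [y]) = insLoop p l ++ [y] := by
  intro l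
  induction l with
  | nil => simp [insLoop, not_le_of_gt hy]
  | cons z zs ih =>
    simp only [List.cons_append, insLoop]
    by_cases h : z.1 ≤ p.1
    · simp [h, ih]
    · simp [h]

lemma insRev_reverse_eq (p : Int × Int) (acc : List (Int × Int))
    (h : acc.Pairwise (fun a b => a.1 ≤ b.1)) :
    (insRev p acc.reverse).reverse = insLoop p acc := by
  induction acc using List.reverseRecOn with
  | nil => simp [insRev, insLoop]
  | append_singleton ds y ih =>
    rcases List.pairwise_append.mp h with ⟨hds, _, hlast⟩
    rw [List.reverse_append]
    simp only [List.reverse_cons, List.reverse_nil, List.nil_append, List.singleton_append, insRev]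
    by_cases hy : y.1 > p.1
    · rw [if_pos hy]
      rw [List.reverse_cons, ih hds, insLoop_append_last p y hy]
    · rw [if_neg hy]
      push Not at hy
      rw [insLoop_all_le p (ds ++ [y]) ?_]
      · simp
      · intro z hz
        rcases List.mem_append.mp hz with hz | hz
        · exact le_trans (hlast z hz y (List.mem_singleton_self y)) hy
        · rw [List.mem_singleton.mp hz]; exact hy

lemma mem_insLoop {z p : Int × Int} : ∀ {acc : List (Int × Int)}, z ∈ insLoop p acc → z = p ∨ z ∈ acc := by
  intro acc
  induction acc with
  | nil => simp [insLoop]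
  | cons y ys ih =>
    simp only [insLoop]
    by_cases h : y.1 ≤ p.1
    · simp only [if_pos h, List.mem_cons]
      rintro (rfl | hz)
      · tauto
      · rcases ih hz with h' | h' <;> tauto
    · simp only [if_neg h, List.mem_cons]
      tauto

lemma insLoop_fst_pairwise (p : Int × Int) :
    ∀ (acc : List (Int × Int)), acc.Pairwise (fun a b => a.1 ≤ b.1) →
    (insLoop p acc).Pairwise (fun a b => a.1 ≤ b.1) := by
  intro acc
  induction acc with
  | nil => intro _; simp [insLoop]
  | cons y ys ih =>
    intro hp
    rcases List.pairwise_cons.mp hp with ⟨hy, hys⟩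
    simp only [insLoop]
    by_cases h : y.1 ≤ p.1
    · simp only [if_pos h]
      refine List.pairwise_cons.mpr ⟨?_, ih hys⟩
      intro z hz
      rcases mem_insLoop hz with rfl | hz'
      · exact h
      · exact hy z hz'
    · simp only [if_neg h]
      push Not at h
      refine List.pairwise_cons.mpr ⟨?_, hp⟩
      intro z hz
      rcases List.mem_cons.mp hz with rfl | hz'
      · exact le_of_lt h
      · exact le_of_lt (lt_of_lt_of_le h (hy z hz'))

lemma foldl_insRev_eq (f : Int → Int) :
    ∀ (l : List Int) (acc : List (Int × Int)), acc.Pairwise (fun a b => a.1 ≤ b.1) →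
    l.foldl (fun a pid => (insRev (f pid, pid) a.reverse).reverse) acc
      = l.foldl (fun a pid => insLoop (f pid, pid) a) acc := by
  intro l
  induction l with
  | nil => intro acc _; simp
  | cons x xs ih =>
    intro acc h
    simp only [List.foldl_cons]
    rw [insRev_reverse_eq _ _ h]
    exact ih _ (insLoop_fst_pairwise _ _ h)

lemma insLoop_perm (p : Int × Int) : ∀ (acc : List (Int × Int)), (insLoop p acc).Perm (p :: acc) := by
  intro acc
  induction acc with
  | nil => simp [insLoop]
  | cons y ys ih =>
    simp only [insLoop]
    by_cases h : y.1 ≤ p.1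
    · simp only [if_pos h]
      exact (ih.cons y).trans (List.Perm.swap p y ys)
    · simp [if_neg h]

-- the lexicographic order maintained by the insertion: rank strictly up, or equal rank and φ (roster position) strictly up
def PLex (φ : Int → Nat) (p q : Int × Int) : Prop := p.1 < q.1 ∨ (p.1 = q.1 ∧ φ p.2 < φ q.2)

lemma insLoop_pairwise (φ : Int → Nat) (p : Int × Int) :
    ∀ (acc : List (Int × Int)), acc.Pairwise (PLex φ) → (∀ y ∈ acc, φ y.2 < φ p.2) →
    (insLoop p acc).Pairwise (PLex φ) := by
  intro acc
  induction acc with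
  | nil => intro _ _; simp [insLoop]
  | cons y ys ih =>
    intro hp hφ
    rcases List.pairwise_cons.mp hp with ⟨hy, hys⟩
    simp only [insLoop]
    by_cases h : y.1 ≤ p.1
    · simp only [if_pos h]
      refine List.pairwise_cons.mpr ⟨?_, ih hys (fun z hz => hφ z (List.mem_cons_of_mem _ hz))⟩
      intro z hz
      rcases mem_insLoop hz with rfl | hz'
      · rcases lt_or_eq_of_le h with h' | h'
        · exact Or.inl h'
        · exact Or.inr ⟨h', hφ y List.mem_cons_self⟩
      · exact hy z hz'
    · simp only [if_neg h]
      push Not at h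
      refine List.pairwise_cons.mpr ⟨?_, hp⟩
      intro z hz
      rcases List.mem_cons.mp hz with rfl | hz'
      · exact Or.inl h
      · have := hy z hz'
        rcases this with h' | ⟨h', _⟩
        · exact Or.inl (h.trans h')
        · exact Or.inl (h.trans_eq h')

lemma fold_insLoop_perm (f : Int → Int) :
    ∀ (l : List Int) (acc : List (Int × Int)),
      (l.foldl (fun a pid => insLoop (f pid, pid) a) acc).Perm (acc ++ l.map (fun pid => (f pid, pid))) := by
  intro l
  induction l with
  | nil => intro acc; simp
  | cons x xs ih =>
    intro acc
    simp only [List.foldl_cons, List.map_cons]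
    refine (ih _).trans ?_
    have h1 : (insLoop (f x, x) acc).Perm ((f x, x) :: acc) := insLoop_perm _ _
    have h2 : (insLoop (f x, x) acc ++ xs.map (fun pid => (f pid, pid))).Perm
        (((f x, x) :: acc) ++ xs.map (fun pid => (f pid, pid))) := h1.append_right _
    have h3 : (((f x, x) :: acc) ++ xs.map (fun pid => (f pid, pid))).Perm
        (acc ++ ((f x, x) :: xs.map (fun pid => (f pid, pid)))) := List.perm_middle.symm
    exact h2.trans h3

lemma fold_insLoop_pairwise (φ : Int → Nat) (f : Int → Int) :
    ∀ (l : List Int) (acc : List (Int × Int)),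
      acc.Pairwise (PLex φ) → (∀ y ∈ acc, ∀ x ∈ l, φ y.2 < φ x) → l.Pairwise (fun a b => φ a < φ b) →
      (l.foldl (fun a pid => insLoop (f pid, pid) a) acc).Pairwise (PLex φ) := by
  intro l
  induction l with
  | nil => intro acc h _ _; simpa
  | cons x xs ih =>
    intro acc hacc hlt hl
    rcases List.pairwise_cons.mp hl with ⟨hx, hxs⟩
    simp only [List.foldl_cons]
    refine ih _ (insLoop_pairwise φ _ acc hacc (fun y hy => hlt y hy x List.mem_cons_self)) ?_ hxs
    intro y hy z hz
    rcases mem_insLoop hy with rfl | hy'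
    · exact hx z hz
    · exact hlt y hy' z (List.mem_cons_of_mem _ hz)

-- nodup lists are strictly idxOf-increasing
lemma nodup_pairwise_idxOf : ∀ (l : List Int), l.Nodup → l.Pairwise (fun a b => l.idxOf a < l.idxOf b) := by
  intro l h
  induction l with
  | nil => simp
  | cons x t ih =>
    rcases List.nodup_cons.mp h with ⟨hx, ht⟩
    refine List.pairwise_cons.mpr ⟨?_, ?_⟩
    · intro b hb
      have hbx : b ≠ x := fun e => hx (e ▸ hb)
      simp [List.idxOf_cons_self, List.idxOf_cons_ne _ (Ne.symm hbx)]
    · refine (ih ht).imp_of_mem ?_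
      intro a b ha hb hab
      have hax : a ≠ x := fun e => hx (e ▸ ha)
      have hbx : b ≠ x := fun e => hx (e ▸ hb)
      simpa [List.idxOf_cons_ne _ (Ne.symm hax), List.idxOf_cons_ne _ (Ne.symm hbx)] using hab

lemma enumDict_getD : ∀ (l : List Int), l.Nodup → ∀ (s : Int) (d : PySem.Dict Int Int) (b : Int),
    ((PySem.List.enumerate l s).foldl (fun d (p : Int × Int) => d.insert p.2 p.1) d).getD b 0
    = if b ∈ l then s + (l.idxOf b : Int) else d.getD b 0 := by
  intro l
  induction l with
  | nil => intro _ s d b; simp [PySem.List.enumerate]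
  | cons x t ih =>
    intro h s d b
    rcases List.nodup_cons.mp h with ⟨hx, ht⟩
    have he : PySem.List.enumerate (x :: t) s = (s, x) :: PySem.List.enumerate t (s + 1) := by
      simp [PySem.List.enumerate]
    rw [he, List.foldl_cons]
    rw [ih ht (s+1) (d.insert x s) b]
    by_cases hbt : b ∈ t
    · have hbx : b ≠ x := fun e => hx (e ▸ hbt)
      simp [hbt, hbx, List.idxOf_cons_ne _ (Ne.symm hbx)]
      omega
    · by_cases hbxx : b = x
      · subst hbxx
        simp [hbt, List.idxOf_cons_self]
      · simp [hbt, hbxx, PySem.Dict.getD_insert]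

-- the dict comprehension over enumerate, on a nodup list, is the idxOf table
lemma pyEnumDict_getD (l : List Int) (hND : l.Nodup) (b : Int) (hb : b ∈ l) :
    (pyEnumDict l).getD b 0 = (l.idxOf b : Int) := by
  unfold pyEnumDict
  rw [enumDict_getD l hND 0 PySem.Dict.empty b]
  simp [hb]

lemma sorted2_eq_sorted_lex (xs : List Int) (k1 k2 : Int → Int) :
    PySem.List.sorted2 xs k1 k2 = PySem.List.sorted xs (fun x => toLex (k1 x, k2 x)) := by
  simp only [PySem.List.sorted2, PySem.List.sorted]
  have hbe : (fun a b => decide (k1 a < k1 b) || (!decide (k1 b < k1 a) && decide (k2 a < k2 b)))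
       = (fun a b => decide ((toLex (k1 a, k2 a)) < (toLex (k1 b, k2 b)))) := by
    funext a b
    rcases lt_trichotomy (k1 a) (k1 b) with h | h | h
    · simp [Prod.Lex.lt_iff, h, asymm h]
    · simp [Prod.Lex.lt_iff, h]
    · simp [Prod.Lex.lt_iff, asymm h, h, ne_of_gt h]
  rw [hbe]
  norm_num

-- ===== VERDICT (by name: the statement is the Claim_ definition above) =====
theorem rank_roster_players_spec : Claim_equal_rank_roster_players := by
  intro team_id roster_players ranked_history _
  unfold Spec_rank_roster_players
  simp only [rank_roster_players, rank_roster_players_alt]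
  rw [alt_fold]
  rw [foldl_insRev_eq (fun pid => (pyEnumDict ((PySem.Dict.mk ranked_history).getD team_id [])).getD pid (10^9)) _ [] (by simp)]
  have hR : unique_ints roster_players = newIds PySem.Set.empty roster_players := by
    unfold unique_ints
    rw [unique_ints_fold]
    simp
  rw [hR]
  set hist := (PySem.Dict.mk ranked_history).getD team_id [] with hhist
  set rankD := pyEnumDict hist with hrankD
  set R := newIds PySem.Set.empty roster_players with hRdef
  have hnd : R.Nodup := newIds_nodup roster_players PySem.Set.empty
  set f : Int → Int := fun pid => rankD.getD pid (10^9) with hf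
  set S := R.foldl (fun a pid => insLoop (f pid, pid) a) [] with hS
  have hperm : S.Perm (R.map (fun pid => (f pid, pid))) := by
    simpa using fold_insLoop_perm f R []
  have hpermB : (S.map (·.2)).Perm R := by
    have := hperm.map (·.2)
    simpa [List.map_map, Function.comp_def] using this
  by_cases hnil : R = []
  · simp [hnil, hS]
  · rw [if_neg hnil]
    have hpair : S.Pairwise (PLex (fun b => R.idxOf b)) := by
      refine fold_insLoop_pairwise _ f R [] (by simp) (by simp) ?_
      exact nodup_pairwise_idxOf R hnd
    rw [sorted2_eq_sorted_lex]
    refine PySem.List.sorted_eq_of_perm_of_pairwise_lt R (S.map (·.2))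
      (fun x => toLex (rankD.getD x (10^9), (pyEnumDict R).getD x 0)) hpermB ?_
    rw [List.pairwise_map]
    refine hpair.imp_of_mem ?_
    intro p q hp hq hpq
    have hmemg : ∀ z ∈ S, z = (f z.2, z.2) ∧ z.2 ∈ R := by
      intro z hz
      have : z ∈ R.map (fun pid => (f pid, pid)) := hperm.subset hz
      rcases List.mem_map.mp this with ⟨pid, hpid, rfl⟩
      exact ⟨rfl, hpid⟩
    rcases hmemg p hp with ⟨hpg, hpR⟩
    rcases hmemg q hq with ⟨hqg, hqR⟩
    have hp1 : p.1 = f p.2 := by rw [hpg]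
    have hq1 : q.1 = f q.2 := by rw [hqg]
    rw [Prod.Lex.lt_iff]
    simp only [ofLex_toLex]
    rcases hpq with h | ⟨h1, h2⟩
    · exact Or.inl (show f p.2 < f q.2 by rw [← hp1, ← hq1]; exact h)
    · refine Or.inr ⟨show f p.2 = f q.2 by rw [← hp1, ← hq1]; exact h1, ?_⟩
      show (pyEnumDict R).getD p.2 0 < (pyEnumDict R).getD q.2 0
      rw [pyEnumDict_getD R hnd p.2 hpR, pyEnumDict_getD R hnd q.2 hqR]
      exact_mod_cast h2
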